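-- pv_equiv track=rewrite | github.com/arujbansal/cpdrills | CP_Platform/utils/codeforces.py | code_extract_problemset
-- ===== SOURCE A (Python) =====
-- def code_extract_problemset(problem_url):
--     code = ""
--
--     count = 0
--     for i in range(len(problem_url) - 1, -1, -1):
--         if problem_url[i] == '/':
--             count += 1
--             continue
--
--         if count >= 2:
--             break
--
--         code += problem_url[i]
--
--     return code[::-1]
-- ===== SOURCE B (Python) =====
-- def code_extract_problemset(problem_url):
--     parts = problem_url.rsplit('/', 2)
--     return ''.join(parts[-2:])
-- ===== Notes on version B (the rewrite author's own statement) =====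
-- stated objective: simpler
-- what changed: Replaces A's backwards character-by-character index loop with slash counting, early break and a final string reversal by one right-split limited to two cuts followed by joining the last two path segments.
import Mathlib
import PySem

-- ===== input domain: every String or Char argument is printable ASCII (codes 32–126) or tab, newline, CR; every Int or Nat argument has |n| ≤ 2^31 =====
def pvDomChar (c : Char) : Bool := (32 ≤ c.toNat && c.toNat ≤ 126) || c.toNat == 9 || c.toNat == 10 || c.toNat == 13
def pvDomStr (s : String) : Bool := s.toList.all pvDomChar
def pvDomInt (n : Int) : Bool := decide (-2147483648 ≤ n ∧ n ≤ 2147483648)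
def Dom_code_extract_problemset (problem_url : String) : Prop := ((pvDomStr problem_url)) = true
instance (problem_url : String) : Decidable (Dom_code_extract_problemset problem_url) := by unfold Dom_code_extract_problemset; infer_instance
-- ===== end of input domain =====

-- B replaces A's reverse index loop with counters by rsplit('/', 2) + join of the last two parts (simpler decomposition).

-- ===== PORT A =====
-- A's backwards for-loop over indices len-1 .. 0 with early break, rendered as
-- structural recursion over the reversed character list; `code` accumulates by
-- appending (code += ch) and is reversed at the end (code[::-1]).
def pvALoop : List Char → List Char → Int → List Char
  | [], code, _ => code
  | c :: rest, code, count =>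
    if c = '/' then pvALoop rest code (count + 1)
    else if count ≥ 2 then code
    else pvALoop rest (code ++ [c]) count

def code_extract_problemset (problem_url : String) : String :=
  String.mk (pvALoop problem_url.toList.reverse [] 0).reverse

-- ===== PORT B =====
-- hand-written port of str.rsplit('/', 2): walks the reversed characters, cutting
-- at '/' while the split budget lasts; returns the parts in RIGHT-TO-LEFT order,
-- each part's characters in forward order.
def pvRsplitR : List Char → Nat → List Char → List (List Char)
  | [], _, cur => [cur]
  | c :: rest, b, cur =>
    if c = '/' then
      if b = 0 then pvRsplitR rest b (c :: cur)
      else cur :: pvRsplitR rest (b - 1) []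
    else pvRsplitR rest b (c :: cur)

-- ''.join(parts[-2:]) on the right-to-left parts list: the last two parts are the
-- first two entries p0 (rightmost) and p1, joined in forward order p1 ++ p0.
def pvJoinLast2 : List (List Char) → List Char
  | [] => []
  | [p0] => p0
  | p0 :: p1 :: _ => p1 ++ p0

def code_extract_problemset_alt (problem_url : String) : String :=
  String.mk (pvJoinLast2 (pvRsplitR problem_url.toList.reverse 2 []))

-- ===== PRECONDITION & SPEC =====
def Spec_code_extract_problemset (problem_url : String) (out : String) : Prop := out = code_extract_problemset_alt problem_url
instance (problem_url : String) (out : String) : Decidable (Spec_code_extract_problemset problem_url out) := by unfold Spec_code_extract_problemset; infer_instance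

-- ===== CLAIM (what is proved, stated in full; the proofs are below) =====
def Claim_equal_code_extract_problemset : Prop := ∀ (problem_url : String), Dom_code_extract_problemset problem_url → Spec_code_extract_problemset problem_url (code_extract_problemset problem_url)

-- ===== LEMMAS AND PROOFS =====

-- A's accumulator factors out.
theorem pvALoop_append (rev : List Char) (code : List Char) (count : Int) :
    pvALoop rev code count = code ++ pvALoop rev [] count := by
  induction rev generalizing code count with
  | nil => simp [pvALoop]
  | cons c rest ih =>
    by_cases h : c = '/'
    · simp only [pvALoop, if_pos h]
      exact ih code (count + 1)
    · by_cases h2 : count ≥ 2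
      · simp [pvALoop, h, h2]
      · simp only [pvALoop, if_neg h, if_neg h2, List.nil_append]
        rw [ih (code ++ [c]) count, ih [c] count]
        simp

-- Once count ≥ 2, A collects nothing more.
theorem pvALoop_done (rev : List Char) (count : Int) (h : count ≥ 2) :
    pvALoop rev [] count = [] := by
  induction rev generalizing count with
  | nil => simp [pvALoop]
  | cons c rest ih =>
    by_cases hc : c = '/'
    · simp [pvALoop, hc, ih (count + 1) (by omega)]
    · simp [pvALoop, hc, h]

-- pvRsplitR always returns at least one part.
theorem pvRsplitR_ne (rev : List Char) (b : Nat) (cur : List Char) :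
    pvRsplitR rev b cur ≠ [] := by
  induction rev generalizing b cur with
  | nil => simp [pvRsplitR]
  | cons c rest ih =>
    by_cases h : c = '/'
    · by_cases hb : b = 0
      · simpa [pvRsplitR, h, hb] using ih b (c :: cur)
      · simp [pvRsplitR, h, hb]
    · simpa [pvRsplitR, h] using ih b (c :: cur)

-- B's current-segment accumulator factors out of the first (rightmost) part.
theorem pvRsplitR_acc (rev : List Char) (b : Nat) (cur : List Char) :
    pvRsplitR rev b cur =
      ((pvRsplitR rev b []).head! ++ cur) :: (pvRsplitR rev b []).tail := by
  induction rev generalizing b cur with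
  | nil => simp [pvRsplitR]
  | cons c rest ih =>
    by_cases h : c = '/'
    · by_cases hb : b = 0
      · simp only [pvRsplitR, if_pos h, if_pos hb]
        rw [ih b (c :: cur), ih b (c :: [])]
        simp
      · simp [pvRsplitR, h, hb]
    · simp only [pvRsplitR, if_neg h]
      rw [ih b (c :: cur), ih b (c :: [])]
      simp

-- Joining the last two parts after a fresh rightmost split is the old first part.
theorem pvJoinLast2_nil_cons (l : List (List Char)) (h : l ≠ []) :
    pvJoinLast2 ([] :: l) = l.head! := by
  rcases l with _ | ⟨q0, qs⟩
  · exact absurd rfl h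
  · cases qs <;> simp [pvJoinLast2]

-- With budget 1, A's count-1 phase collects exactly the rightmost part.
theorem pv_level1 (rev : List Char) :
    (pvALoop rev [] 1).reverse = (pvRsplitR rev 1 []).head! := by
  induction rev with
  | nil => simp [pvALoop, pvRsplitR]
  | cons c rest ih =>
    by_cases h : c = '/'
    · have h1 : (1 : Int) + 1 = 2 := by norm_num
      simp [pvALoop, pvRsplitR, h, h1, pvALoop_done rest 2 (by omega)]
    · simp only [pvALoop, pvRsplitR, if_neg h]
      norm_num
      rw [pvALoop_append rest [c] 1, pvRsplitR_acc rest 1 [c]]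
      simp [ih]

-- Main invariant at the top level (budget 2 / count 0).
theorem pv_main (rev : List Char) :
    (pvALoop rev [] 0).reverse = pvJoinLast2 (pvRsplitR rev 2 []) := by
  induction rev with
  | nil => simp [pvALoop, pvRsplitR, pvJoinLast2]
  | cons c rest ih =>
    by_cases h : c = '/'
    · have h1 : (0 : Int) + 1 = 1 := by norm_num
      simp only [pvALoop, pvRsplitR, if_pos h, h1]
      norm_num
      rw [pvJoinLast2_nil_cons _ (pvRsplitR_ne rest 1 []), pv_level1 rest]
    · simp only [pvALoop, pvRsplitR, if_neg h]
      norm_num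
      rw [pvALoop_append rest [c] 0, pvRsplitR_acc rest 2 [c]]
      rcases hr : pvRsplitR rest 2 [] with _ | ⟨p0, ps⟩
      · exact absurd hr (pvRsplitR_ne rest 2 [])
      · rw [hr] at ih
        cases ps <;> simp_all [pvJoinLast2]

-- ===== VERDICT (by name: the statement is the Claim_ definition above) =====
theorem code_extract_problemset_spec : Claim_equal_code_extract_problemset := by
  intro u _
  unfold Spec_code_extract_problemset code_extract_problemset code_extract_problemset_alt
  rw [pv_main]
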